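-- pv_equiv track=rewrite | github.com/SamuraiJenkinz/xmcp | chat_app/context_mgr.py | _group_messages
-- ===== SOURCE A (Python) =====
-- from typing import Any
--
-- def _group_messages(non_system: list[dict[str, Any]]) -> list[list[dict[str, Any]]]:
--     """Group non-system messages into atomic units that must be removed together.
--
--     Groups:
--     - A standalone user or assistant message (no tool_calls) is its own group.
--     - An assistant message with tool_calls + all subsequent tool/function result
--       messages form one group (removing the assistant without the tool results
--       causes an OpenAI API error).
--     """
--     groups: list[list[dict[str, Any]]] = []
--     i = 0
--     while i < len(non_system):
--         msg = non_system[i]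
--         # Assistant with tool_calls — group with all following tool results
--         if msg.get("role") == "assistant" and msg.get("tool_calls"):
--             group = [msg]
--             i += 1
--             while i < len(non_system) and non_system[i].get("role") in ("tool", "function"):
--                 group.append(non_system[i])
--                 i += 1
--             groups.append(group)
--         # Orphaned tool/function result (no preceding assistant) — group alone
--         elif msg.get("role") in ("tool", "function"):
--             groups.append([msg])
--             i += 1
--         else:
--             groups.append([msg])
--             i += 1
--     return groups
-- ===== SOURCE B (Python) =====
-- def _group_messages(non_system):
--     """Single flat pass: one boolean flag tracks whether the last group is an
--     open assistant-with-tool_calls group awaiting its tool results."""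
--     groups = []
--     open_group = False
--     for msg in non_system:
--         if msg.get("role") == "assistant" and msg.get("tool_calls"):
--             groups.append([msg])
--             open_group = True
--         elif open_group and msg.get("role") in ("tool", "function"):
--             groups[-1].append(msg)
--         else:
--             groups.append([msg])
--             open_group = False
--     return groups
-- ===== Notes on version B (the rewrite author's own statement) =====
-- stated objective: simpler
-- what changed: Replaces A's index-driven outer while loop with a nested inner while that consumes tool results by a single flat for-loop over the messages maintaining one boolean open_group flag that decides whether a tool/function message joins the last group.
import Mathlib
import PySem

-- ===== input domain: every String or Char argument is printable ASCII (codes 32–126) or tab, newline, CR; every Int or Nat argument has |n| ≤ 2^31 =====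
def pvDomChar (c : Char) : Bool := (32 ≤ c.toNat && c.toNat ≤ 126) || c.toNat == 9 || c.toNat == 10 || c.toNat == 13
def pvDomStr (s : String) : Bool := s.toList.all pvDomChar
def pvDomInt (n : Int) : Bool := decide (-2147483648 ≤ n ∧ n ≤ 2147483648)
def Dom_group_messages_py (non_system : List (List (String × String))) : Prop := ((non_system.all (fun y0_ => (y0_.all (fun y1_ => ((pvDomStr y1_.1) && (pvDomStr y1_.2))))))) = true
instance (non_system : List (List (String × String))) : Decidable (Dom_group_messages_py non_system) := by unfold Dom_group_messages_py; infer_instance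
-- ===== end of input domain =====

-- B replaces A's index-based outer/inner while loops by one flat pass with a boolean
-- "open group" flag (objective: simpler; return value proved equal on all inputs).

-- shared helpers: msg.get(k) on the association-list dict, and the two role tests
def pvGet (m : List (String × String)) (k : String) : Option String :=
  (PySem.Dict.mk m).get? k

-- msg.get("role") == "assistant" and msg.get("tool_calls")  (truthy = non-empty string)
def isAsstTC (m : List (String × String)) : Bool :=
  (pvGet m "role" == some "assistant") &&
    (match pvGet m "tool_calls" with
     | some s => !(s == "")
     | none => false)

-- msg.get("role") in ("tool", "function")
def isTool (m : List (String × String)) : Bool :=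
  pvGet m "role" == some "tool" || pvGet m "role" == some "function"

-- ===== PORT A =====
-- A's inner while loop: consume the leading run of tool/function results
def consumeTools : List (List (String × String)) → List (List (String × String)) × List (List (String × String))
  | [] => ([], [])
  | m :: rest =>
    if isTool m then
      let p := consumeTools rest
      (m :: p.1, p.2)
    else ([], m :: rest)

theorem consumeTools_snd_len (l : List (List (String × String))) :
    (consumeTools l).2.length ≤ l.length := by
  induction l with
  | nil => simp [consumeTools]
  | cons m rest ih =>
    simp only [consumeTools]
    split
    · simpa using Nat.le_succ_of_le ih
    · simp

-- A's outer while loop over the index i, as recursion on the remaining messages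
def group_messages_py (non_system : List (List (String × String))) : List (List (List (String × String))) :=
  match non_system with
  | [] => []
  | m :: rest =>
    if isAsstTC m then
      (m :: (consumeTools rest).1) :: group_messages_py (consumeTools rest).2
    else
      [m] :: group_messages_py rest
termination_by non_system.length
decreasing_by
  · exact Nat.lt_succ_of_le (consumeTools_snd_len rest)
  · simp

-- ===== PORT B =====
-- one step of B's flat loop; state = (groups so far, open_group flag)
def stepB (st : List (List (List (String × String))) × Bool) (m : List (String × String)) :
    List (List (List (String × String))) × Bool :=
  if isAsstTC m then (st.1 ++ [[m]], true)
  else if st.2 && isTool m then (st.1.dropLast ++ [st.1.getLastD [] ++ [m]], true)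
  else (st.1 ++ [[m]], false)

def group_messages_py_alt (non_system : List (List (String × String))) : List (List (List (String × String))) :=
  (non_system.foldl stepB ([], false)).1

-- ===== PRECONDITION & SPEC =====
def Spec_group_messages_py (non_system : List (List (String × String))) (out : List (List (List (String × String)))) : Prop := out = group_messages_py_alt non_system
instance (non_system : List (List (String × String))) (out : List (List (List (String × String)))) : Decidable (Spec_group_messages_py non_system out) := by unfold Spec_group_messages_py; infer_instance

-- ===== CLAIM (what is proved, stated in full; the proofs are below) =====
def Claim_equal_group_messages_py : Prop := ∀ (non_system : List (List (String × String))), Dom_group_messages_py non_system → Spec_group_messages_py non_system (group_messages_py non_system)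

-- ===== LEMMAS AND PROOFS =====

-- an assistant-with-tool_calls message is never a tool/function result
theorem not_isTool_of_isAsstTC (m : List (String × String)) (h : isAsstTC m = true) :
    isTool m = false := by
  unfold isAsstTC at h
  unfold isTool
  rcases Bool.and_eq_true_iff.mp h with ⟨hr, _⟩
  have : pvGet m "role" = some "assistant" := by
    cases hg : pvGet m "role" <;> simp [hg] at hr ⊢; simp_all
  simp [this]

-- joint loop invariant: B's fold from a closed state produces A's groups appended to
-- the accumulator; from an open state whose last group is g it first absorbs the
-- leading tool run (A's inner while) into g
theorem fold_inv (l : List (List (String × String))) :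
    (∀ gs, (l.foldl stepB (gs, false)).1 = gs ++ group_messages_py l) ∧
    (∀ gs g, (l.foldl stepB (gs ++ [g], true)).1 =
      gs ++ ((g ++ (consumeTools l).1) :: group_messages_py (consumeTools l).2)) := by
  induction l with
  | nil => simp [group_messages_py, consumeTools]
  | cons m rest ih =>
    obtain ⟨ih1, ih2⟩ := ih
    constructor
    · intro gs
      by_cases ha : isAsstTC m = true
      · rw [List.foldl_cons]
        simp only [stepB, ha, if_true]
        rw [ih2 gs [m]]
        simp [group_messages_py, ha]
      · rw [List.foldl_cons]
        simp only [stepB, ha, Bool.false_and, Bool.false_eq_true, if_false]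
        rw [ih1 (gs ++ [[m]])]
        simp [group_messages_py, ha]
    · intro gs g
      by_cases ha : isAsstTC m = true
      · rw [List.foldl_cons]
        simp only [stepB, ha, if_true]
        rw [show gs ++ [g] ++ [[m]] = (gs ++ [g]) ++ [[m]] from rfl, ih2 (gs ++ [g]) [m]]
        have ht := not_isTool_of_isAsstTC m ha
        simp [consumeTools, ht, group_messages_py, ha]
      · by_cases htool : isTool m = true
        · rw [List.foldl_cons]
          simp only [stepB, ha, Bool.true_and, htool, Bool.false_eq_true, if_false, if_true]
          rw [List.dropLast_concat, List.getLastD_concat]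
          rw [ih2 gs (g ++ [m])]
          simp [consumeTools, htool]
        · rw [List.foldl_cons]
          simp only [stepB, ha, Bool.true_and, htool, Bool.false_eq_true, if_false]
          rw [show gs ++ [g] ++ [[m]] = (gs ++ [g] ++ [[m]]) from rfl, ih1 (gs ++ [g] ++ [[m]])]
          simp [consumeTools, htool, group_messages_py, ha]

-- ===== VERDICT (by name: the statement is the Claim_ definition above) =====
theorem group_messages_py_spec : Claim_equal_group_messages_py := by
  intro l _
  unfold Spec_group_messages_py group_messages_py_alt
  have h := (fold_inv l).1 []
  simp at h
  exact h.symm
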